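-- pv_equiv track=rewrite | github.com/jsgrayson/myaddons-mono | SkillWeaver/tools/spec_checklist.py | candidate_partners
-- ===== SOURCE A (Python) =====
-- def candidate_partners(spells, spellbook, leader):
--   # partners: other CDs 20s+ excluding leader
--   cand = []
--   for s in spells:
--     if s == leader: continue
--     cd = (spellbook.get(s, {}) or {}).get("cooldown") or 0
--     if cd >= 20:
--       cand.append((cd, s))
--   cand.sort(reverse=True)
--   return [s for _, s in cand][:4]
-- ===== SOURCE B (Python) =====
-- def candidate_partners(spells, spellbook, leader):
--   # Bounded partial selection: keep at most 4 best (cd, s) tuples in descending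
--   # order via ordered insertion, instead of collecting all candidates and full-sorting.
--   top = []  # at most 4 (cd, s) tuples, kept in descending tuple order
--   for s in spells:
--     if s == leader: continue
--     cd = (spellbook.get(s, {}) or {}).get("cooldown") or 0
--     if cd >= 20:
--       t = (cd, s)
--       i = 0
--       while i < len(top) and top[i] >= t:
--         i += 1
--       top.insert(i, t)
--       del top[4:]
--   return [s for _, s in top]
-- ===== Notes on version B (the rewrite author's own statement) =====
-- stated objective: alternative
-- what changed: Replaces collect-all-candidates + full reverse sort + slice by a single pass that maintains at most 4 (cd, spell) tuples in descending order via bounded ordered insertion (a top-k partial selection), so no full candidate list is ever built or sorted.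
import Mathlib
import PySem

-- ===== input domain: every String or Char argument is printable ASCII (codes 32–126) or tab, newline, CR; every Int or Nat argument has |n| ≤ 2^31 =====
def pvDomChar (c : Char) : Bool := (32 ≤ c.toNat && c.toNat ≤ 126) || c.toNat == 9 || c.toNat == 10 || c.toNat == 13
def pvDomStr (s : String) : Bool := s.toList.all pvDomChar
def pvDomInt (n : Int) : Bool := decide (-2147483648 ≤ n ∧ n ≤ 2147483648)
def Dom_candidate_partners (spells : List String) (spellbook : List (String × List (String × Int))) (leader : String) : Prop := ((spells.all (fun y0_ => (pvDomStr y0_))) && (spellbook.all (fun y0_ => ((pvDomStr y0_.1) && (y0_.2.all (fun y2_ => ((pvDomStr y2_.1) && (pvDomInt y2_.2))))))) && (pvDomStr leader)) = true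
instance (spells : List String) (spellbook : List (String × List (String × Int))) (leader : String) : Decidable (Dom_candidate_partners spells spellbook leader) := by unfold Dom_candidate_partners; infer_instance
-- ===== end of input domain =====

-- B replaces A's collect-all + full sort + slice by a single pass keeping at most 4
-- (cd, s) tuples in descending order via bounded ordered insertion (objective: alternative).

-- ===== PORT A =====
def candidate_partners (spells : List String) (spellbook : List (String × List (String × Int))) (leader : String) : List String :=
  let cand := spells.foldl (fun cand s =>
    if s == leader then cand
    else
      let d0 := (PySem.Dict.mk spellbook).getD s []        -- spellbook.get(s, {})
      let d := if d0 == [] then [] else d0                  -- `or {}` (identity on the default)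
      let cd := ((PySem.Dict.mk d).get? "cooldown").getD 0  -- .get("cooldown") or 0 (int: falsy only at 0)
      if cd ≥ 20 then cand ++ [(cd, s)] else cand) []
  ((PySem.List.sorted2 cand Prod.fst Prod.snd true).map Prod.snd).take 4  -- [:4] on a nonneg stop = take

-- ===== PORT B =====
-- Python tuple comparison (cd, s) < (cd', s'), lexicographic
def pvTupLt (a b : Int × String) : Bool :=
  decide (a.1 < b.1) || (!decide (b.1 < a.1) && decide (a.2 < b.2))

-- the while/insert of Source B: insert t before the first element with top[i] < t
def pvInsDesc (t : Int × String) : List (Int × String) → List (Int × String)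
  | [] => [t]
  | y :: ys => if !(pvTupLt y t) then y :: pvInsDesc t ys else t :: y :: ys

def candidate_partners_alt (spells : List String) (spellbook : List (String × List (String × Int))) (leader : String) : List String :=
  (spells.foldl (fun top s =>
    if s == leader then top
    else
      let d0 := (PySem.Dict.mk spellbook).getD s []
      let d := if d0 == [] then [] else d0
      let cd := ((PySem.Dict.mk d).get? "cooldown").getD 0
      if cd ≥ 20 then (pvInsDesc (cd, s) top).take 4 else top) []).map Prod.snd

-- ===== PRECONDITION & SPEC =====
def Spec_candidate_partners (spells : List String) (spellbook : List (String × List (String × Int))) (leader : String) (out : List String) : Prop := out = candidate_partners_alt spells spellbook leader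
instance (spells : List String) (spellbook : List (String × List (String × Int))) (leader : String) (out : List String) : Decidable (Spec_candidate_partners spells spellbook leader out) := by unfold Spec_candidate_partners; infer_instance

-- ===== CLAIM (what is proved, stated in full; the proofs are below) =====
def Claim_equal_candidate_partners : Prop := ∀ (spells : List String) (spellbook : List (String × List (String × Int))) (leader : String), Dom_candidate_partners spells spellbook leader → Spec_candidate_partners spells spellbook leader (candidate_partners spells spellbook leader)

-- ===== LEMMAS AND PROOFS =====

-- the shared filter of both loops, as a partial map
def pvCand (spellbook : List (String × List (String × Int))) (leader : String) (s : String) : Option (Int × String) :=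
  if s == leader then none
  else
    let d0 := (PySem.Dict.mk spellbook).getD s []
    let d := if d0 == [] then [] else d0
    let cd := ((PySem.Dict.mk d).get? "cooldown").getD 0
    if cd ≥ 20 then some (cd, s) else none

-- the reverse comparator of sorted2 with keys fst, snd
def pvBefore (a b : Int × String) : Bool := pvTupLt b a

theorem pvInsDesc_eq_insertBy (t : Int × String) (L : List (Int × String)) :
    pvInsDesc t L = PySem.List.insertBy pvBefore t L := by
  induction L with
  | nil => rfl
  | cons y ys ih =>
    simp only [pvInsDesc, PySem.List.insertBy, pvBefore, ih]
    by_cases h : pvTupLt y t = true <;> simp [h]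

-- a guarded left fold is a left fold over the filterMap of its guard
theorem foldl_guard {β : Type} (f : String → Option (Int × String))
    (g : β → (Int × String) → β) (xs : List String) (acc : β) :
    xs.foldl (fun e x => match f x with | some t => g e t | none => e) acc
    = (xs.filterMap f).foldl g acc := by
  induction xs generalizing acc with
  | nil => rfl
  | cons x xs ih =>
    simp only [List.foldl_cons, List.filterMap_cons]
    cases hx : f x with
    | none => simp [ih]
    | some t => simp [ih]

-- both ports' loop bodies are the guarded form of their accumulation step
theorem step_eq {β : Type} (spellbook : List (String × List (String × Int))) (leader : String)
    (g : β → (Int × String) → β) :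
    (fun (e : β) (s : String) =>
      if s == leader then e
      else
        let d0 := (PySem.Dict.mk spellbook).getD s []
        let d := if d0 == [] then [] else d0
        let cd := ((PySem.Dict.mk d).get? "cooldown").getD 0
        if cd ≥ 20 then g e (cd, s) else e)
    = (fun (e : β) (s : String) => match pvCand spellbook leader s with | some t => g e t | none => e) := by
  funext e s
  simp only [pvCand]
  by_cases h1 : (s == leader) = true
  · simp [h1]
  · simp only [h1, Bool.false_eq_true, if_false]
    split <;> split <;> rfl

theorem take_insertBy (b : (Int × String) → (Int × String) → Bool) (t : Int × String)
    (L : List (Int × String)) (n : Nat) :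
    (PySem.List.insertBy b t L).take n = (PySem.List.insertBy b t (L.take n)).take n := by
  induction L generalizing n with
  | nil => simp
  | cons y ys ih =>
    cases n with
    | zero => simp
    | succ m =>
      rw [List.take_succ_cons]
      by_cases h : b t y = true
      · have e1 : PySem.List.insertBy b t (y :: ys) = t :: y :: ys := by
          simp [PySem.List.insertBy, h]
        have e2 : PySem.List.insertBy b t (y :: ys.take m) = t :: y :: ys.take m := by
          simp [PySem.List.insertBy, h]
        rw [e1, e2, List.take_succ_cons, List.take_succ_cons]
        cases m with
        | zero => simp
        | succ k =>
          rw [List.take_succ_cons, List.take_succ_cons, List.take_take]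
          have : min k (k + 1) = k := by omega
          rw [this]
      · have e1 : PySem.List.insertBy b t (y :: ys) = y :: PySem.List.insertBy b t ys := by
          simp [PySem.List.insertBy, h]
        have e2 : PySem.List.insertBy b t (y :: ys.take m) = y :: PySem.List.insertBy b t (ys.take m) := by
          simp [PySem.List.insertBy, h]
        rw [e1, e2, List.take_succ_cons, List.take_succ_cons, ih m]

theorem fold_take (b : (Int × String) → (Int × String) → Bool)
    (cs : List (Int × String)) (L : List (Int × String)) :
    cs.foldl (fun top t => (PySem.List.insertBy b t top).take 4) (L.take 4)
    = (cs.foldl (fun acc t => PySem.List.insertBy b t acc) L).take 4 := by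
  induction cs generalizing L with
  | nil => rfl
  | cons c cs ih =>
    simp only [List.foldl_cons]
    rw [← take_insertBy, ih]

theorem append_fold_eq_filterMap (f : String → Option (Int × String))
    (xs : List String) (acc : List (Int × String)) :
    xs.foldl (fun e x => match f x with | some t => e ++ [t] | none => e) acc
    = acc ++ xs.filterMap f := by
  rw [foldl_guard]
  induction xs.filterMap f generalizing acc with
  | nil => simp
  | cons c cs ih => simp [ih]

theorem candidate_partners_eq (spells : List String) (spellbook : List (String × List (String × Int))) (leader : String) :
    candidate_partners spells spellbook leader = candidate_partners_alt spells spellbook leader := by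
  unfold candidate_partners candidate_partners_alt
  rw [step_eq spellbook leader (fun e t => e ++ [t]),
      step_eq spellbook leader (fun top t => (pvInsDesc t top).take 4),
      append_fold_eq_filterMap, foldl_guard]
  simp only [List.nil_append]
  set cs := spells.filterMap (pvCand spellbook leader) with hcs
  have hsorted : PySem.List.sorted2 cs Prod.fst Prod.snd true
      = cs.foldl (fun acc t => PySem.List.insertBy pvBefore t acc) [] := rfl
  rw [hsorted, ← List.map_take, ← fold_take]
  have hfun : (fun (e : List (Int × String)) (t : Int × String) => List.take 4 (pvInsDesc t e))
      = (fun (e : List (Int × String)) (t : Int × String) => List.take 4 (PySem.List.insertBy pvBefore t e)) := by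
    funext e t
    rw [pvInsDesc_eq_insertBy]
  rw [hfun]
  simp only [List.take_nil]

-- ===== VERDICT (by name: the statement is the Claim_ definition above) =====
theorem candidate_partners_spec : Claim_equal_candidate_partners := by
  intro spells spellbook leader _
  unfold Spec_candidate_partners
  exact candidate_partners_eq spells spellbook leader
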